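-- pv_equiv track=rewrite | github.com/Gio2889/Advent-of-code-2025 | problem-5/p5-a.py | split_inventory
-- ===== SOURCE A (Python) =====
-- def split_inventory(inventory):
--     dict_type = "ranges"
--     ranges = []
--     #ranges ={}
--     ids = []
--     k = 1
--     for item in inventory:
--         if not item:
--             dict_type ="ids"
--             continue
--         # if dict_type == "ranges":
--         #     nums=item.split("-")
--         #     ranges[k] = [num for num in range(int(nums[0]),int(nums[-1])+1)]
--         #     k+=1
--         if dict_type == "ranges":
--             ranges.append(item)
--         else:
--             ids.append(item)
--     return ranges,ids
-- ===== SOURCE B (Python) =====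
-- def split_inventory(inventory):
--     try:
--         split = inventory.index("")
--     except ValueError:
--         return list(inventory), []
--     return inventory[:split], [x for x in inventory[split + 1:] if x]
-- ===== Notes on version B (the rewrite author's own statement) =====
-- stated objective: idiomatic
-- what changed: Replaces the stateful flag-accumulation loop with locate-then-slice: find the first empty item with list.index, slice the ranges before it, and filter out remaining empty items after it.
import Mathlib
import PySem

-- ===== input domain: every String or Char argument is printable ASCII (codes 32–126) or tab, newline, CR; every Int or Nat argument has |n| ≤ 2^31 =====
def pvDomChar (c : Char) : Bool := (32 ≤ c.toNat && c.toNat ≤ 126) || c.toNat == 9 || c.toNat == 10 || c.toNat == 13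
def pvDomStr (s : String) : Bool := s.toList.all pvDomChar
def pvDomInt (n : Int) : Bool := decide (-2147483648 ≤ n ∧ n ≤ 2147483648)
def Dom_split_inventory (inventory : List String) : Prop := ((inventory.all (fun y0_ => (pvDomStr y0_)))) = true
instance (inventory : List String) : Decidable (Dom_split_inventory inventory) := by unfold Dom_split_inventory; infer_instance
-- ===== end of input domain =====

-- B replaces A's stateful flag-accumulation loop with locate-then-slice/filter (idiomatic; same cost).

-- ===== PORT A =====
-- the for-loop of A, state = (dict_type, ranges, ids)
def splitInvLoop : List String → String → List String → List String → List String × List String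
  | [], _, ranges, ids => (ranges, ids)
  | item :: rest, dt, ranges, ids =>
    if item = "" then splitInvLoop rest "ids" ranges ids
    else if dt = "ranges" then splitInvLoop rest dt (ranges ++ [item]) ids
    else splitInvLoop rest dt ranges (ids ++ [item])

def split_inventory (inventory : List String) : List String × List String :=
  splitInvLoop inventory "ranges" [] []

-- ===== PORT B =====
def split_inventory_alt (inventory : List String) : List String × List String :=
  match PySem.List.index? inventory "" with
  | none => (inventory, [])
  | some split => (inventory.take split, (inventory.drop (split + 1)).filter (fun x => x ≠ ""))

-- ===== PRECONDITION & SPEC =====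
def Spec_split_inventory (inventory : List String) (out : List String × List String) : Prop := out = split_inventory_alt inventory
instance (inventory : List String) (out : List String × List String) : Decidable (Spec_split_inventory inventory out) := by unfold Spec_split_inventory; infer_instance

-- ===== CLAIM (what is proved, stated in full; the proofs are below) =====
def Claim_equal_split_inventory : Prop := ∀ (inventory : List String), Dom_split_inventory inventory → Spec_split_inventory inventory (split_inventory inventory)

-- ===== LEMMAS AND PROOFS =====
theorem splitInvLoop_ids (l : List String) (ranges ids : List String) :
    splitInvLoop l "ids" ranges ids = (ranges, ids ++ l.filter (fun x => x ≠ "")) := by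
  induction l generalizing ids with
  | nil => simp [splitInvLoop]
  | cons x rest ih =>
    by_cases hx : x = "" <;> simp [splitInvLoop, hx, ih]

theorem splitInvLoop_ranges (l : List String) (ranges ids : List String) :
    splitInvLoop l "ranges" ranges ids =
      match PySem.List.index? l "" with
      | none => (ranges ++ l, ids)
      | some i => (ranges ++ l.take i, ids ++ (l.drop (i + 1)).filter (fun x => x ≠ "")) := by
  induction l generalizing ranges with
  | nil => simp [splitInvLoop]
  | cons x rest ih =>
    by_cases hx : x = ""
    · subst hx
      rw [PySem.List.index?_cons_self]
      simp [splitInvLoop, splitInvLoop_ids]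
    · have hcons : PySem.List.index? (x :: rest) "" = (PySem.List.index? rest "").map (· + 1) :=
        PySem.List.index?_cons_of_ne rest hx
      simp only [splitInvLoop, if_neg hx]
      rw [ih]
      cases h : PySem.List.index? rest "" with
      | none => rw [hcons, h]; simp
      | some i =>
        rw [hcons, h]
        simp

-- ===== VERDICT (by name: the statement is the Claim_ definition above) =====
theorem split_inventory_spec : Claim_equal_split_inventory := by
  intro inventory _
  unfold Spec_split_inventory split_inventory split_inventory_alt
  rw [splitInvLoop_ranges]
  cases h : PySem.List.index? inventory "" <;> simp
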